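-- pv_equiv track=rewrite | github.com/oliverschwartz/leet | lint_wood_cut/lint_wood_cut.py | woodCut
-- ===== SOURCE A (Python) =====
-- def woodCut(L, k):
--     # write your code here
--
--     def is_valid(length):
--         pieces = 0
--         for l in L:
--             pieces += l // length
--         return pieces >= k
--
--     max_length = 0
--     l, r = 1, max(L)
--     while l <= r:
--         mid = (l + r) // 2
--         if is_valid(mid):
--             l = mid + 1
--             max_length = mid
--         else:
--             r = mid - 1
--
--     return max_length
-- ===== SOURCE B (Python) =====
-- def woodCut(L, k):
--     def pieces(t):
--         return sum(l // t for l in L)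
--
--     t = max(L)
--     while t >= 1:
--         if pieces(t) >= k:
--             return t
--         # skip to the largest smaller t where some quotient l // t changes
--         t = max(l // (l // t + 1) for l in L)
--     return 0
-- ===== Notes on version B (the rewrite author's own statement) =====
-- stated objective: alternative
-- what changed: Replaces A's binary search over [1, max(L)] by a descending scan that jumps between the lengths where some quotient l // t changes, returning the first length with enough pieces (0 if none).
-- outside the precondition, e.g. on woodCut([-7, 5], -1): A returns 0, B returns 5; on woodCut([], 3): A raises ValueError, B raises ValueError
import Mathlib
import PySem

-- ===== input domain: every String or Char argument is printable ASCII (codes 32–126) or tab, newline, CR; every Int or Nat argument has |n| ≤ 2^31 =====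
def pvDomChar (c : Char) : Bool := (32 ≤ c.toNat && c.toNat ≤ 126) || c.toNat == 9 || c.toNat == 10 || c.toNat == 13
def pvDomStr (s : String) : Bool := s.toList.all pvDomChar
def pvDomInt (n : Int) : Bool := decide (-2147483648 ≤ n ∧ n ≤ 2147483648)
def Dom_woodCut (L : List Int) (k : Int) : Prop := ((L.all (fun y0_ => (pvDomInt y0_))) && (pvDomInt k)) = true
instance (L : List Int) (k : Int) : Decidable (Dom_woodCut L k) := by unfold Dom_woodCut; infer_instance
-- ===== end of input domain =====

-- B replaces A's binary search by a descending scan that skips between quotient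
-- breakpoints (objective: alternative; not claimed faster).


-- ===== PORT A =====
-- A's is_valid: explicit accumulation loop over L
def isValidA (L : List Int) (k : Int) (length : Int) : Bool :=
  decide (k ≤ L.foldl (fun pieces l => pieces + PySem.Int.floordiv l length) 0)

-- A's while-loop, state (max_length, l, r)
def aLoop (L : List Int) (k : Int) (ml l r : Int) : Int :=
  if _h : l ≤ r then
    let mid := PySem.Int.floordiv (l + r) 2
    if isValidA L k mid then aLoop L k mid (mid + 1) r
    else aLoop L k ml l (mid - 1)
  else ml
termination_by (r + 1 - l).toNat
decreasing_by
  · have := PySem.Int.floordiv_two_mid_bounds (lo := l) (hi := r) _h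
    omega
  · have := PySem.Int.floordiv_two_mid_bounds (lo := l) (hi := r) _h
    omega

def woodCut (L : List Int) (k : Int) : Int :=
  match PySem.List.max? L (fun x => x) with
  | none => 0          -- Python raises ValueError here; excluded by Pre_
  | some m => aLoop L k 0 1 m

-- ===== PORT B =====
-- B's pieces(t): sum over a generator expression
def bPieces (L : List Int) (t : Int) : Int :=
  (L.map (fun l => PySem.Int.floordiv l t)).sum

-- B's jump: max(l // (l // t + 1) for l in L)
def bJump (L : List Int) (t : Int) : Int :=
  match PySem.List.max? (L.map (fun l => PySem.Int.floordiv l (PySem.Int.floordiv l t + 1))) (fun x => x) with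
  | none => 0          -- unreachable: L ≠ [] whenever bJump is called
  | some j => j

-- B's while-loop; the fuel only makes the recursion total (inside Pre_ the jump
-- strictly decreases t, so fuel = t.toNat is never exhausted)
def bLoop (L : List Int) (k : Int) : Nat → Int → Int
  | 0, t =>
    if 1 ≤ t then
      if k ≤ bPieces L t then t
      else 0          -- fuel exhausted: dead inside Pre_
    else 0
  | n + 1, t =>
    if 1 ≤ t then
      if k ≤ bPieces L t then t
      else bLoop L k n (bJump L t)
    else 0

def woodCut_alt (L : List Int) (k : Int) : Int :=
  match PySem.List.max? L (fun x => x) with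
  | none => 0          -- Python raises ValueError here; excluded by Pre_
  | some m => bLoop L k m.toNat m

-- ===== PRECONDITION & SPEC =====
-- Pre_ excludes empty L, on which Python's max(L) raises ValueError, and mixed-sign lists
-- (a negative element together with a positive maximum), on which A's binary search runs
-- over a non-monotone validity predicate and its returned value is an accident of the
-- bisection path (e.g. A returns 0 on ([-7, 5], -1) where B returns the genuinely valid
-- length 5); all-nonpositive lists stay inside (both programs return 0 there).
def Pre_woodCut (L : List Int) (k : Int) : Prop :=
  L ≠ [] ∧ ((∀ x ∈ L, 0 ≤ x) ∨ (∀ x ∈ L, x ≤ 0))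
instance (L : List Int) (k : Int) : Decidable (Pre_woodCut L k) := by unfold Pre_woodCut; infer_instance

def pvWitness_woodCut : List Int × Int := ([5, 9, 7], 3)

def Spec_woodCut (L : List Int) (k : Int) (out : Int) : Prop := out = woodCut_alt L k
instance (L : List Int) (k : Int) (out : Int) : Decidable (Spec_woodCut L k out) := by unfold Spec_woodCut; infer_instance

-- ===== CLAIM (what is proved, stated in full; the proofs are below) =====
def Claim_equal_woodCut : Prop := ∀ (L : List Int) (k : Int), Dom_woodCut L k → Pre_woodCut L k → Spec_woodCut L k (woodCut L k)

-- ===== LEMMAS AND PROOFS =====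

-- A's is_valid decides the same inequality as B's pieces
theorem isValidA_iff (L : List Int) (k t : Int) :
    isValidA L k t = true ↔ k ≤ bPieces L t := by
  simp [isValidA, bPieces, PySem.List.foldl_add]

-- floor division by a positive divisor is antitone in the divisor for a nonneg numerator
theorem fd_anti {x a b : Int} (hx : 0 ≤ x) (ha : 0 < a) (hab : a ≤ b) :
    PySem.Int.floordiv x b ≤ PySem.Int.floordiv x a := by
  rw [PySem.Int.floordiv_eq_ediv_of_pos (by omega), PySem.Int.floordiv_eq_ediv_of_pos ha]
  have h1 : x / b * a ≤ x := by
    calc x / b * a ≤ x / b * b := by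
          have : 0 ≤ x / b := Int.ediv_nonneg hx (by omega)
          exact mul_le_mul_of_nonneg_left hab this
      _ ≤ x := Int.ediv_mul_le x (by omega)
  exact (Int.le_ediv_iff_mul_le ha).mpr h1

-- pieces is antitone on [1, ∞) when all lengths are nonneg
theorem pieces_anti {L : List Int} (hL : ∀ x ∈ L, 0 ≤ x)
    {i j : Int} (hi : 1 ≤ i) (hij : i ≤ j) :
    bPieces L j ≤ bPieces L i := by
  unfold bPieces
  refine List.sum_le_sum ?_
  intro x hx
  exact fd_anti (hL x hx) (by omega) hij

-- inside a quotient block the quotient is unchanged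
theorem block_eq {l s t : Int} (hl : 0 ≤ l) (hs : 1 ≤ s) (hst : s ≤ t)
    (h : PySem.Int.floordiv l (PySem.Int.floordiv l t + 1) < s) :
    PySem.Int.floordiv l s = PySem.Int.floordiv l t := by
  set q := PySem.Int.floordiv l t with hq
  have hq0 : 0 ≤ q := by
    rw [hq, PySem.Int.floordiv_eq_ediv_of_pos (by omega)]
    exact Int.ediv_nonneg hl (by omega)
  have hle : q ≤ PySem.Int.floordiv l s := fd_anti hl (by omega) hst
  by_contra hne
  have hgt : q + 1 ≤ PySem.Int.floordiv l s := by omega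
  have h1 : (q + 1) * s ≤ l := (PySem.Int.le_floordiv_iff_mul_le (by omega)).mp hgt
  have h2 : s ≤ PySem.Int.floordiv l (q + 1) :=
    (PySem.Int.le_floordiv_iff_mul_le (by omega)).mpr (by linarith [h1])
  omega

-- each jump candidate is below t
theorem jump_cand_lt {l t : Int} (hl : 0 ≤ l) (ht : 1 ≤ t) :
    PySem.Int.floordiv l (PySem.Int.floordiv l t + 1) < t := by
  set q := PySem.Int.floordiv l t with hq
  have hq0 : 0 ≤ q := by
    rw [hq, PySem.Int.floordiv_eq_ediv_of_pos (by omega)]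
    exact Int.ediv_nonneg hl (by omega)
  have : l < (q + 1) * t := by
    have := (PySem.Int.floordiv_lt_iff_lt_mul (a := l) (b := t) (q := q + 1) (by omega)).mp (by omega)
    exact this
  exact (PySem.Int.floordiv_lt_iff_lt_mul (by omega)).mpr (by linarith)

-- the jump strictly decreases t
theorem jump_lt {L : List Int} (hL : ∀ x ∈ L, 0 ≤ x) (hne : L ≠ []) {t : Int} (ht : 1 ≤ t) :
    bJump L t < t := by
  unfold bJump
  cases hq : PySem.List.max? (L.map (fun l => PySem.Int.floordiv l (PySem.Int.floordiv l t + 1))) (fun x => x) with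
  | none =>
    rw [PySem.List.max?_eq_none_iff, List.map_eq_nil_iff] at hq
    exact absurd hq hne
  | some j =>
    obtain ⟨l, hlL, rfl⟩ := List.mem_map.mp (PySem.List.max?_mem hq)
    exact jump_cand_lt (hL l hlL) ht

-- each jump candidate is at most the jump
theorem cand_le_jump {L : List Int} {l t : Int} (hl : l ∈ L) :
    PySem.Int.floordiv l (PySem.Int.floordiv l t + 1) ≤ bJump L t := by
  unfold bJump
  cases hq : PySem.List.max? (L.map (fun x => PySem.Int.floordiv x (PySem.Int.floordiv x t + 1))) (fun x => x) with
  | none =>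
    rw [PySem.List.max?_eq_none_iff, List.map_eq_nil_iff] at hq
    subst hq
    cases hl
  | some j =>
    exact PySem.List.max?_isMax hq _ (List.mem_map_of_mem hl)

-- the skipped lengths all have the same pieces count
theorem jump_skip {L : List Int} (hL : ∀ x ∈ L, 0 ≤ x) {s t : Int}
    (hs : 1 ≤ s) (hst : s ≤ t) (h : bJump L t < s) :
    bPieces L s = bPieces L t := by
  unfold bPieces
  refine congrArg List.sum (List.map_congr_left ?_)
  intro l hlL
  refine block_eq (hL l hlL) hs hst ?_
  have := cand_le_jump (l := l) (t := t) hlL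
  omega

-- uniqueness of the "greatest length with enough pieces in [1, M], else 0" characterization
theorem char_unique (L : List Int) (k : Int) (M g1 g2 : Int)
    (h1 : (g1 = 0 ∧ ∀ j : Int, 1 ≤ j → j ≤ M → ¬ (k ≤ bPieces L j)) ∨
      (1 ≤ g1 ∧ g1 ≤ M ∧ k ≤ bPieces L g1 ∧
        ∀ j : Int, g1 < j → j ≤ M → ¬ (k ≤ bPieces L j)))
    (h2 : (g2 = 0 ∧ ∀ j : Int, 1 ≤ j → j ≤ M → ¬ (k ≤ bPieces L j)) ∨
      (1 ≤ g2 ∧ g2 ≤ M ∧ k ≤ bPieces L g2 ∧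
        ∀ j : Int, g2 < j → j ≤ M → ¬ (k ≤ bPieces L j))) :
    g1 = g2 := by
  rcases h1 with ⟨e1, a1⟩ | ⟨p1, m1, v1, a1⟩ <;> rcases h2 with ⟨e2, a2⟩ | ⟨p2, m2, v2, a2⟩
  · omega
  · exact absurd v2 (a1 g2 p2 m2)
  · exact absurd v1 (a2 g1 p1 m1)
  · by_contra hne
    rcases lt_or_gt_of_ne hne with h | h
    · exact absurd v2 (a1 g2 h m2)
    · exact absurd v1 (a2 g1 h m1)

-- B's loop returns the greatest length in [1, t] with enough pieces (0 if none)
theorem bLoop_spec (L : List Int) (k : Int) (hL : ∀ x ∈ L, 0 ≤ x) (hne : L ≠ []) :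
    ∀ (fuel : Nat) (t : Int), t ≤ (fuel : Int) →
    (bLoop L k fuel t = 0 ∧ ∀ j : Int, 1 ≤ j → j ≤ t → ¬ (k ≤ bPieces L j)) ∨
    (1 ≤ bLoop L k fuel t ∧ bLoop L k fuel t ≤ t ∧ k ≤ bPieces L (bLoop L k fuel t) ∧
      ∀ j : Int, bLoop L k fuel t < j → j ≤ t → ¬ (k ≤ bPieces L j)) := by
  intro fuel
  induction fuel with
  | zero =>
    intro t hfuel
    rw [show bLoop L k 0 t = if 1 ≤ t then (if k ≤ bPieces L t then t else 0) else 0 from rfl, if_neg (by push_cast at hfuel; omega)]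
    exact Or.inl ⟨rfl, fun j h1 h2 => by omega⟩
  | succ n ih =>
    intro t hfuel
    by_cases ht : 1 ≤ t
    · by_cases hv : k ≤ bPieces L t
      · rw [bLoop, if_pos ht, if_pos hv]
        exact Or.inr ⟨ht, le_rfl, hv, fun j h1 h2 => by omega⟩
      · rw [bLoop, if_pos ht, if_neg hv]
        have hjl : bJump L t < t := jump_lt hL hne ht
        have hrec := ih (bJump L t) (by push_cast at hfuel ⊢; omega)
        rcases hrec with ⟨h0, hall⟩ | ⟨h1', h2', h3', h4'⟩
        · refine Or.inl ⟨h0, ?_⟩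
          intro j hj1 hj2 hc
          by_cases hjj : j ≤ bJump L t
          · exact hall j hj1 hjj hc
          · rw [jump_skip hL hj1 hj2 (by omega)] at hc
            exact hv hc
        · refine Or.inr ⟨h1', by omega, h3', ?_⟩
          intro j hj1 hj2 hc
          by_cases hjj : j ≤ bJump L t
          · exact h4' j hj1 hjj hc
          · rw [jump_skip hL (by omega) hj2 (by omega)] at hc
            exact hv hc
    · rw [bLoop, if_neg ht]
      exact Or.inl ⟨rfl, fun j h1 h2 => by omega⟩

-- aLoop maintains the binary-search invariant and ends with the same characterization
theorem aLoop_spec (L : List Int) (k : Int) (hL : ∀ x ∈ L, 0 ≤ x) (M : Int) :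
    ∀ (n : Nat) (ml l r : Int), (r + 1 - l).toNat ≤ n →
    1 ≤ l → l ≤ r + 1 → r ≤ M → ml = l - 1 →
    (ml = 0 ∨ (1 ≤ ml ∧ k ≤ bPieces L ml)) →
    (∀ j : Int, r < j → j ≤ M → ¬ (k ≤ bPieces L j)) →
    (aLoop L k ml l r = 0 ∧ ∀ j : Int, 1 ≤ j → j ≤ M → ¬ (k ≤ bPieces L j)) ∨
    (1 ≤ aLoop L k ml l r ∧ aLoop L k ml l r ≤ M ∧ k ≤ bPieces L (aLoop L k ml l r) ∧
      ∀ j : Int, aLoop L k ml l r < j → j ≤ M → ¬ (k ≤ bPieces L j)) := by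
  intro n
  induction n with
  | zero =>
    intro ml l r hfuel h1 h2 h3 hml hv habove
    have hlr : ¬ l ≤ r := by omega
    rw [aLoop, dif_neg hlr]
    rcases hv with h0 | ⟨hp, hP⟩
    · exact Or.inl ⟨h0, fun j hj1 hj2 => habove j (by omega) hj2⟩
    · exact Or.inr ⟨hp, by omega, hP, fun j hj1 hj2 => habove j (by omega) hj2⟩
  | succ m ih =>
    intro ml l r hfuel h1 h2 h3 hml hv habove
    by_cases hlr : l ≤ r
    · rw [aLoop, dif_pos hlr]
      have hmid := PySem.Int.floordiv_two_mid_bounds (lo := l) (hi := r) hlr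
      set mid := PySem.Int.floordiv (l + r) 2 with hmiddef
      by_cases hvm : k ≤ bPieces L mid
      · rw [if_pos ((isValidA_iff L k mid).mpr hvm)]
        exact ih mid (mid + 1) r (by omega) (by omega) (by omega) h3 (by omega)
          (Or.inr ⟨by omega, hvm⟩) habove
      · rw [if_neg (by rw [Bool.not_eq_true]; exact (Bool.not_eq_true _).mp (fun h => hvm ((isValidA_iff L k mid).mp h)))]
        refine ih ml l (mid - 1) (by omega) h1 (by omega) (by omega) hml hv ?_
        intro j hj1 hj2 hc
        by_cases hjr : r < j
        · exact habove j hjr hj2 hc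
        · -- mid ≤ j ≤ r : pieces j ≤ pieces mid would give k ≤ pieces mid
          have := pieces_anti hL (i := mid) (j := j) (by omega) (by omega)
          exact hvm (le_trans hc this)
    · rw [aLoop, dif_neg hlr]
      rcases hv with h0 | ⟨hp, hP⟩
      · exact Or.inl ⟨h0, fun j hj1 hj2 => habove j (by omega) hj2⟩
      · exact Or.inr ⟨hp, by omega, hP, fun j hj1 hj2 => habove j (by omega) hj2⟩

-- ===== VERDICT (by name: the statement is the Claim_ definition above) =====
theorem woodCut_spec : Claim_equal_woodCut := by
  intro L k _hdom hpre
  obtain ⟨hne, hsign⟩ := hpre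
  unfold Spec_woodCut
  cases hq : PySem.List.max? L (fun y => y) with
  | none =>
    rw [PySem.List.max?_eq_none_iff] at hq
    exact absurd hq hne
  | some m =>
    simp only [woodCut, woodCut_alt, hq]
    rcases hsign with hnonneg | hnonpos
    · have hm0 : 0 ≤ m := hnonneg m (PySem.List.max?_mem hq)
      have hA := aLoop_spec L k hnonneg m m.toNat 0 1 m (by omega) (by omega) (by omega)
        le_rfl (by omega) (Or.inl rfl) (fun j hj1 hj2 => absurd hj2 (by omega))
      have hB := bLoop_spec L k hnonneg hne m.toNat m (by omega)
      exact char_unique L k m _ _ hA hB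
    · -- max ≤ 0: both loops return 0 immediately
      have hm0 : m ≤ 0 := hnonpos m (PySem.List.max?_mem hq)
      rw [aLoop, dif_neg (by omega)]
      cases hmt : m.toNat with
      | zero => rw [bLoop, if_neg (by omega)]
      | succ n => rw [bLoop, if_neg (by omega)]
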